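-- pv_equiv track=rewrite | github.com/jasonvan/prexel | plugin/encoders/pretty_print_encoder.py | concat_aggregation
-- ===== SOURCE A (Python) =====
-- def concat_aggregation(aggregator, aggregation, aggregated):
--     result = []
--     aggregator_parts = list(filter(None, aggregator.split("\n")))
--     aggregated_parts = list(filter(None, aggregated.split("\n")))
--
--     length_aggregator = len(max(aggregator_parts))
--     length_aggregated = len(max(aggregated_parts))
--     length_aggregation = len(aggregation)
--
--     height_aggregator = len(aggregator_parts)
--     height_aggregated = len(aggregated_parts)
--
--     combined = zip(aggregator_parts, aggregated_parts)
--     combined_list = list(combined)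
--     start_index = len(combined_list)
--
--     for index, item in enumerate(combined_list):
--         line = item[0]
--         if index == 1:
--             line += aggregation
--         else:
--             line += " " * length_aggregation
--
--         line += item[1]
--
--         result.append(line)
--
--     if height_aggregator > height_aggregated:
--         for item in aggregator_parts[start_index:]:
--             line = item
--             line += " " * length_aggregation
--             line += " " * length_aggregated
--             result.append(line)
--     elif height_aggregated > height_aggregator:
--         for item in aggregated_parts[start_index:]:
--             line = " " * length_aggregator
--             line += " " * length_aggregation
--             line += item
--             result.append(line)
--     else:
--         pass  # If they are the same length they are already combined
--
--     return "\n".join(result) + "\n"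
-- ===== SOURCE B (Python) =====
-- def concat_aggregation(aggregator, aggregation, aggregated):
--     aggregator_parts = list(filter(None, aggregator.split("\n")))
--     aggregated_parts = list(filter(None, aggregated.split("\n")))
--
--     length_aggregator = len(max(aggregator_parts))
--     length_aggregated = len(max(aggregated_parts))
--     length_aggregation = len(aggregation)
--
--     height_aggregator = len(aggregator_parts)
--     height_aggregated = len(aggregated_parts)
--     min_height = min(height_aggregator, height_aggregated)
--
--     lines = []
--     for index in range(max(height_aggregator, height_aggregated)):
--         left = aggregator_parts[index] if index < height_aggregator else " " * length_aggregator
--         middle = aggregation if index == 1 and index < min_height else " " * length_aggregation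
--         right = aggregated_parts[index] if index < height_aggregated else " " * length_aggregated
--         lines.append(left + middle + right)
--     return "\n".join(lines) + "\n"
-- ===== Notes on version B (the rewrite author's own statement) =====
-- stated objective: simpler
-- what changed: A's zip loop plus two separate tail-padding loops are merged into one indexed loop over range(max height) that picks each line's left/middle/right piece directly; the length/height computations (including the len(max(...)) quirk) are kept.
import Mathlib
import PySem

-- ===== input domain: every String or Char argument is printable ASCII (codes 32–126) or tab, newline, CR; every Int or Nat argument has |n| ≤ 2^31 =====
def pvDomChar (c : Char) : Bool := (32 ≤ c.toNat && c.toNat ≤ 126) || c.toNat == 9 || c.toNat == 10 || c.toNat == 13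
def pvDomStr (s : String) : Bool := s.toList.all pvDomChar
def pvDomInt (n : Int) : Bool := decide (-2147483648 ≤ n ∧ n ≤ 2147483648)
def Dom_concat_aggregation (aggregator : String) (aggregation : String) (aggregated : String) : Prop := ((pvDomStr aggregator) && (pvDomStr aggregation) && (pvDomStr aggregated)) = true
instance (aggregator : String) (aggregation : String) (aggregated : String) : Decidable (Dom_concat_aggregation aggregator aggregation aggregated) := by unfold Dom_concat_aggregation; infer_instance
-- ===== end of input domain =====

-- B merges A's zip loop and its two tail-padding loops into one indexed loop over range(max height); same output, same cost (objective: simpler).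

-- shared prelude of both Pythons: list(filter(None, s.split("\n"))) and len(max(parts)) (lexicographic max, as in A and B)
def pvLines (s : String) : List (List Char) :=
  ((PySem.Chars.split? s.toList ['\n']).getD []).filter (fun p => !p.isEmpty)

def pvMaxLen (parts : List (List Char)) : Nat :=
  ((PySem.List.max? parts (fun x => x)).getD []).length

-- ===== PORT A =====
def concat_aggregation (aggregator : String) (aggregation : String) (aggregated : String) : String :=
  let aggregator_parts := pvLines aggregator
  let aggregated_parts := pvLines aggregated
  let length_aggregator := pvMaxLen aggregator_parts
  let length_aggregated := pvMaxLen aggregated_parts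
  let length_aggregation := aggregation.toList.length
  let height_aggregator := aggregator_parts.length
  let height_aggregated := aggregated_parts.length
  let combined_list := aggregator_parts.zip aggregated_parts
  let start_index := combined_list.length
  let result := (PySem.List.enumerate combined_list).foldl
    (fun acc p =>
      let line := p.2.1 ++ (if p.1 == 1 then aggregation.toList else List.replicate length_aggregation ' ') ++ p.2.2
      acc ++ [line]) []
  let result :=
    if height_aggregator > height_aggregated then
      (PySem.List.slice aggregator_parts (some (start_index : Int)) none).foldl
        (fun acc item => acc ++ [item ++ List.replicate length_aggregation ' ' ++ List.replicate length_aggregated ' ']) result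
    else if height_aggregated > height_aggregator then
      (PySem.List.slice aggregated_parts (some (start_index : Int)) none).foldl
        (fun acc item => acc ++ [List.replicate length_aggregator ' ' ++ List.replicate length_aggregation ' ' ++ item]) result
    else result
  String.ofList (PySem.Chars.join ['\n'] result ++ ['\n'])

-- ===== PORT B =====
def concat_aggregation_alt (aggregator : String) (aggregation : String) (aggregated : String) : String :=
  let aggregator_parts := pvLines aggregator
  let aggregated_parts := pvLines aggregated
  let length_aggregator := pvMaxLen aggregator_parts
  let length_aggregated := pvMaxLen aggregated_parts
  let length_aggregation := aggregation.toList.length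
  let height_aggregator := aggregator_parts.length
  let height_aggregated := aggregated_parts.length
  let min_height := min height_aggregator height_aggregated
  let lines := (List.range (max height_aggregator height_aggregated)).map (fun index =>
    (if index < height_aggregator then aggregator_parts.getD index [] else List.replicate length_aggregator ' ') ++
    (if index == 1 && decide (index < min_height) then aggregation.toList else List.replicate length_aggregation ' ') ++
    (if index < height_aggregated then aggregated_parts.getD index [] else List.replicate length_aggregated ' '))
  String.ofList (PySem.Chars.join ['\n'] lines ++ ['\n'])

-- ===== PRECONDITION & SPEC =====
-- Pre_ excludes exactly the inputs where a block has no non-empty line, on which A's max() raises ValueError (B raises there too).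
def Pre_concat_aggregation (aggregator : String) (aggregation : String) (aggregated : String) : Prop :=
  pvLines aggregator ≠ [] ∧ pvLines aggregated ≠ []
instance (aggregator : String) (aggregation : String) (aggregated : String) : Decidable (Pre_concat_aggregation aggregator aggregation aggregated) := by unfold Pre_concat_aggregation; infer_instance

def pvWitness_concat_aggregation : String × String × String := ("abc\nde", "<>", "x\ny\nz")

def Spec_concat_aggregation (aggregator : String) (aggregation : String) (aggregated : String) (out : String) : Prop := out = concat_aggregation_alt aggregator aggregation aggregated
instance (aggregator : String) (aggregation : String) (aggregated : String) (out : String) : Decidable (Spec_concat_aggregation aggregator aggregation aggregated out) := by unfold Spec_concat_aggregation; infer_instance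

-- ===== CLAIM (what is proved, stated in full; the proofs are below) =====
def Claim_equal_concat_aggregation : Prop := ∀ (aggregator : String) (aggregation : String) (aggregated : String), Dom_concat_aggregation aggregator aggregation aggregated → Pre_concat_aggregation aggregator aggregation aggregated → Spec_concat_aggregation aggregator aggregation aggregated (concat_aggregation aggregator aggregation aggregated)

-- ===== LEMMAS AND PROOFS =====

-- the heart: A's three loops build the same list of lines as B's one indexed loop
theorem pv_lines_eq (pA pD : List (List Char)) (agg : List Char) (lA lD : Nat) :
    (let base := (PySem.List.enumerate (pA.zip pD)).map
      (fun p => p.2.1 ++ (if p.1 == 1 then agg else List.replicate agg.length ' ') ++ p.2.2)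
     if pA.length > pD.length then
       base ++ (pA.drop (pA.zip pD).length).map
         (fun item => item ++ List.replicate agg.length ' ' ++ List.replicate lD ' ')
     else if pD.length > pA.length then
       base ++ (pD.drop (pA.zip pD).length).map
         (fun item => List.replicate lA ' ' ++ List.replicate agg.length ' ' ++ item)
     else base)
    = (List.range (max pA.length pD.length)).map (fun i =>
        (if i < pA.length then pA.getD i [] else List.replicate lA ' ') ++
        (if i == 1 && decide (i < min pA.length pD.length) then agg else List.replicate agg.length ' ') ++
        (if i < pD.length then pD.getD i [] else List.replicate lD ' ')) := by
  simp only []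
  have hzip : (pA.zip pD).length = min pA.length pD.length := List.length_zip
  have core : ∀ i, i < min pA.length pD.length →
      ((PySem.List.enumerate (pA.zip pD)).map
        (fun p => p.2.1 ++ (if p.1 == 1 then agg else List.replicate agg.length ' ') ++ p.2.2)).getD i []
      = (if i < pA.length then pA.getD i [] else List.replicate lA ' ') ++
        (if i == 1 && decide (i < min pA.length pD.length) then agg else List.replicate agg.length ' ') ++
        (if i < pD.length then pD.getD i [] else List.replicate lD ' ') := by
    intro i hi
    have hiA : i < pA.length := by omega
    have hiD : i < pD.length := by omega
    have hie : i < (PySem.List.enumerate (pA.zip pD)).length := by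
      rw [PySem.List.length_enumerate, hzip]; omega
    rw [List.getD_eq_getElem _ [] (by simpa using hie), List.getElem_map,
      PySem.List.getElem_enumerate _ _ _ hie]
    simp only [List.getElem_zip]
    have hcond : (((0:Int) + (i:Int)) == 1) = (i == 1 && decide (i < min pA.length pD.length)) := by
      by_cases h1 : i = 1
      · subst h1; simp [hi]
      · simp [h1, hiA, hiD]
    rw [hcond, if_pos hiA, if_pos hiD,
      List.getD_eq_getElem pA [] hiA, List.getD_eq_getElem pD [] hiD]
  rcases Nat.lt_trichotomy pA.length pD.length with hlt | heq | hgt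
  · rw [if_neg (by omega), if_pos hlt]
    apply List.ext_getElem
    · simp only [List.length_append, List.length_map, PySem.List.length_enumerate, List.length_drop, List.length_range, hzip]; omega
    · intro i h1 h2
      rw [← List.getD_eq_getElem _ ([] : List Char) h1, List.getElem_map, List.getElem_range]
      by_cases hi : i < min pA.length pD.length
      · rw [List.getD_append _ _ _ i (by simpa [hzip, PySem.List.length_enumerate] using hi), core i hi]
      · have hile : i < pD.length := by
          simp only [List.length_map, List.length_range] at h2; omega
        rw [List.getD_append_right _ _ _ i (by simp [hzip, PySem.List.length_enumerate]; omega)]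
        simp only [List.length_map, PySem.List.length_enumerate, hzip]
        have hdrop : i - min pA.length pD.length < ((pD.drop (min pA.length pD.length)).map
            (fun item => List.replicate lA ' ' ++ List.replicate agg.length ' ' ++ item)).length := by
          simp only [List.length_map, List.length_drop]; omega
        rw [List.getD_eq_getElem _ [] hdrop, List.getElem_map, List.getElem_drop]
        have hidx : min pA.length pD.length + (i - min pA.length pD.length) = i := by
          omega
        have hmid : (i == 1 && decide (i < min pA.length pD.length)) = false := by
          simp; omega
        rw [hmid]
        simp only [Bool.false_eq_true, if_false, hidx]
        rw [if_neg (show ¬ i < pA.length by omega), if_pos hile, List.getD_eq_getElem pD [] hile]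
  · rw [if_neg (by omega), if_neg (by omega)]
    apply List.ext_getElem
    · simp only [List.length_append, List.length_map, PySem.List.length_enumerate, List.length_drop, List.length_range, hzip]; omega
    · intro i h1 h2
      have hi : i < min pA.length pD.length := by
        simp only [List.length_map, PySem.List.length_enumerate, hzip] at h1; omega
      rw [← List.getD_eq_getElem _ ([] : List Char) h1, core i hi,
        List.getElem_map, List.getElem_range]
  · rw [if_pos hgt]
    apply List.ext_getElem
    · simp only [List.length_append, List.length_map, PySem.List.length_enumerate, List.length_drop, List.length_range, hzip]; omega
    · intro i h1 h2
      rw [← List.getD_eq_getElem _ ([] : List Char) h1, List.getElem_map, List.getElem_range]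
      by_cases hi : i < min pA.length pD.length
      · rw [List.getD_append _ _ _ i (by simpa [hzip, PySem.List.length_enumerate] using hi), core i hi]
      · have hile : i < pA.length := by
          simp only [List.length_map, List.length_range] at h2; omega
        rw [List.getD_append_right _ _ _ i (by simp [hzip, PySem.List.length_enumerate]; omega)]
        simp only [List.length_map, PySem.List.length_enumerate, hzip]
        have hdrop : i - min pA.length pD.length < ((pA.drop (min pA.length pD.length)).map
            (fun item => item ++ List.replicate agg.length ' ' ++ List.replicate lD ' ')).length := by
          simp only [List.length_map, List.length_drop]; omega
        rw [List.getD_eq_getElem _ [] hdrop, List.getElem_map, List.getElem_drop]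
        have hidx : min pA.length pD.length + (i - min pA.length pD.length) = i := by
          omega
        have hmid : (i == 1 && decide (i < min pA.length pD.length)) = false := by
          simp; omega
        rw [hmid]
        simp only [Bool.false_eq_true, if_false, hidx]
        rw [if_pos hile, if_neg (show ¬ i < pD.length by omega), List.getD_eq_getElem pA [] hile]

-- ===== VERDICT (by name: the statement is the Claim_ definition above) =====
theorem concat_aggregation_spec : Claim_equal_concat_aggregation := by
  intro aggregator aggregation aggregated _ _
  unfold Spec_concat_aggregation concat_aggregation concat_aggregation_alt
  simp only [PySem.List.foldl_append_singleton_eq_map, List.nil_append,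
    PySem.List.slice_from _ (by positivity : (0:Int) ≤ ((pvLines aggregator).zip (pvLines aggregated)).length),
    Int.toNat_natCast]
  have := pv_lines_eq (pvLines aggregator) (pvLines aggregated) aggregation.toList
    (pvMaxLen (pvLines aggregator)) (pvMaxLen (pvLines aggregated))
  simp only [] at this
  split_ifs at this ⊢ <;> rw [this]
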